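-- pv_equiv track=rewrite | github.com/PowerInterest/HillsInspector | src/services/pg_municipal_lien_service.py | _classify_provider_hits
-- ===== SOURCE A (Python) =====
-- PROVIDER_HILLSBOROUGH = "hillsborough_water_resources"
--
-- PROVIDER_TAMPA = "tampa_conduits"
--
-- _HILLSBOROUGH_DIRECT_TOKENS = (
--     "HILLSBOROUGH COUNTY PUBLIC UTILITIES",
--     "HILLSBOROUGH COUNTY WATER RESOURCES",
--     "HILLSBOROUGH COUNTY UTILITIES",
--     "HILLSBOROUGH COUNTY WATER",
-- )
--
-- _TAMPA_DIRECT_TOKENS = (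
--     "CITY OF TAMPA UTILITIES",
--     "CITY OF TAMPA WATER",
--     "CITY OF TAMPA WASTEWATER",
--     "CITY OF TAMPA STORMWATER",
-- )
--
-- _UTILITY_HINT_TOKENS = (
--     "UTILITY",
--     "UTILITIES",
--     "WATER",
--     "WASTEWATER",
--     "SEWER",
--     "STORMWATER",
--     "LIEN",
-- )
--
-- def _classify_provider_hits(haystack_upper: str) -> list[tuple[str, str, str]]:
--     if not haystack_upper:
--         return []
--
--     matches: list[tuple[str, str, str]] = []
--
--     hills_direct = any(token in haystack_upper for token in _HILLSBOROUGH_DIRECT_TOKENS)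
--     tampa_direct = any(token in haystack_upper for token in _TAMPA_DIRECT_TOKENS)
--     has_utility_hint = any(token in haystack_upper for token in _UTILITY_HINT_TOKENS)
--
--     if hills_direct:
--         matches.append(
--             (
--                 PROVIDER_HILLSBOROUGH,
--                 "high",
--                 "direct_hillsborough_utilities_party_match",
--             )
--         )
--     elif "HILLSBOROUGH COUNTY" in haystack_upper and has_utility_hint:
--         matches.append(
--             (
--                 PROVIDER_HILLSBOROUGH,
--                 "medium",
--                 "hillsborough_county_plus_utility_terms",
--             )
--         )
--
--     if tampa_direct:
--         matches.append(
--             (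
--                 PROVIDER_TAMPA,
--                 "high",
--                 "direct_city_tampa_utilities_party_match",
--             )
--         )
--     elif "CITY OF TAMPA" in haystack_upper and has_utility_hint:
--         matches.append(
--             (
--                 PROVIDER_TAMPA,
--                 "medium",
--                 "city_tampa_plus_utility_terms",
--             )
--         )
--
--     return matches
-- ===== SOURCE B (Python) =====
-- PROVIDER_HILLSBOROUGH = "hillsborough_water_resources"
-- PROVIDER_TAMPA = "tampa_conduits"
--
-- _UTILITY_HINT_TOKENS = (
--     "UTILITY",
--     "UTILITIES",
--     "WATER",
--     "WASTEWATER",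
--     "SEWER",
--     "STORMWATER",
--     "LIEN",
-- )
--
-- # Flat rule list in priority order: (token, needs_utility_hint, provider, confidence, reason).
-- # Direct rules precede the broad county/city rules, so first-match-wins per provider
-- # reproduces the high-before-medium preference.
-- _RULES = (
--     ("HILLSBOROUGH COUNTY PUBLIC UTILITIES", False, PROVIDER_HILLSBOROUGH, "high", "direct_hillsborough_utilities_party_match"),
--     ("HILLSBOROUGH COUNTY WATER RESOURCES", False, PROVIDER_HILLSBOROUGH, "high", "direct_hillsborough_utilities_party_match"),
--     ("HILLSBOROUGH COUNTY UTILITIES", False, PROVIDER_HILLSBOROUGH, "high", "direct_hillsborough_utilities_party_match"),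
--     ("HILLSBOROUGH COUNTY WATER", False, PROVIDER_HILLSBOROUGH, "high", "direct_hillsborough_utilities_party_match"),
--     ("CITY OF TAMPA UTILITIES", False, PROVIDER_TAMPA, "high", "direct_city_tampa_utilities_party_match"),
--     ("CITY OF TAMPA WATER", False, PROVIDER_TAMPA, "high", "direct_city_tampa_utilities_party_match"),
--     ("CITY OF TAMPA WASTEWATER", False, PROVIDER_TAMPA, "high", "direct_city_tampa_utilities_party_match"),
--     ("CITY OF TAMPA STORMWATER", False, PROVIDER_TAMPA, "high", "direct_city_tampa_utilities_party_match"),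
--     ("HILLSBOROUGH COUNTY", True, PROVIDER_HILLSBOROUGH, "medium", "hillsborough_county_plus_utility_terms"),
--     ("CITY OF TAMPA", True, PROVIDER_TAMPA, "medium", "city_tampa_plus_utility_terms"),
-- )
--
-- _PROVIDER_ORDER = (PROVIDER_HILLSBOROUGH, PROVIDER_TAMPA)
--
--
-- def _classify_provider_hits(haystack_upper: str) -> list[tuple[str, str, str]]:
--     if not haystack_upper:
--         return []
--
--     has_utility_hint = any(t in haystack_upper for t in _UTILITY_HINT_TOKENS)
--
--     best: dict[str, tuple[str, str]] = {}
--     for token, needs_hint, provider, confidence, reason in _RULES: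
--         if provider in best:
--             continue
--         if token in haystack_upper and (has_utility_hint or not needs_hint):
--             best[provider] = (confidence, reason)
--
--     return [(p,) + best[p] for p in _PROVIDER_ORDER if p in best]
-- ===== Notes on version B (the rewrite author's own statement) =====
-- stated objective: alternative
-- what changed: Replaced the per-provider if/elif branch blocks by a single pass over a flat prioritized rule list (token, needs_hint, provider, confidence, reason) that records the first matching rule per provider in a dict, then emits hits in canonical provider order.
import Mathlib
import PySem

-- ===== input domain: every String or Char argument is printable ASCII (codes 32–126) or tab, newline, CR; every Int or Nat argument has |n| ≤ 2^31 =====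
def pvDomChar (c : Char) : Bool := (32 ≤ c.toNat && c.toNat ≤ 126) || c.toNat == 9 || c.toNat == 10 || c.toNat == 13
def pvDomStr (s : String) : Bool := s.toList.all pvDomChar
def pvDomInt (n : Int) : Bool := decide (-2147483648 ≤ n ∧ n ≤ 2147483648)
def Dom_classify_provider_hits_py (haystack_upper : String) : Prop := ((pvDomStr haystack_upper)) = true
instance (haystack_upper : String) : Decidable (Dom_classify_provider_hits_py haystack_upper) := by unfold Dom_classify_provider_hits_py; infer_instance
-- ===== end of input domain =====

-- B replaces A's two if/elif branch blocks by one pass over a flat prioritized rule list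
-- recording the first matching rule per provider in a dict; objective: alternative structure.
-- ===== PORT A =====
def classify_provider_hits_py (haystack_upper : String) : List (String × String × String) :=
  if haystack_upper = "" then []
  else
    let hills_direct := ["HILLSBOROUGH COUNTY PUBLIC UTILITIES", "HILLSBOROUGH COUNTY WATER RESOURCES",
      "HILLSBOROUGH COUNTY UTILITIES", "HILLSBOROUGH COUNTY WATER"].any
      (fun t => PySem.Str.isIn t haystack_upper)
    let tampa_direct := ["CITY OF TAMPA UTILITIES", "CITY OF TAMPA WATER", "CITY OF TAMPA WASTEWATER",
      "CITY OF TAMPA STORMWATER"].any (fun t => PySem.Str.isIn t haystack_upper)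
    let has_utility_hint := ["UTILITY", "UTILITIES", "WATER", "WASTEWATER", "SEWER", "STORMWATER",
      "LIEN"].any (fun t => PySem.Str.isIn t haystack_upper)
    let acc : List (String × String × String) := []
    let acc :=
      if hills_direct then
        acc ++ [("hillsborough_water_resources", "high", "direct_hillsborough_utilities_party_match")]
      else if PySem.Str.isIn "HILLSBOROUGH COUNTY" haystack_upper && has_utility_hint then
        acc ++ [("hillsborough_water_resources", "medium", "hillsborough_county_plus_utility_terms")]
      else acc
    let acc :=
      if tampa_direct then
        acc ++ [("tampa_conduits", "high", "direct_city_tampa_utilities_party_match")]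
      else if PySem.Str.isIn "CITY OF TAMPA" haystack_upper && has_utility_hint then
        acc ++ [("tampa_conduits", "medium", "city_tampa_plus_utility_terms")]
      else acc
    acc

-- ===== PORT B =====
-- flat prioritized rule list: (token, needs_hint, provider, confidence, reason)
def pvRules : List (String × Bool × String × String × String) :=
  [("HILLSBOROUGH COUNTY PUBLIC UTILITIES", false, "hillsborough_water_resources", "high", "direct_hillsborough_utilities_party_match"),
   ("HILLSBOROUGH COUNTY WATER RESOURCES", false, "hillsborough_water_resources", "high", "direct_hillsborough_utilities_party_match"),
   ("HILLSBOROUGH COUNTY UTILITIES", false, "hillsborough_water_resources", "high", "direct_hillsborough_utilities_party_match"),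
   ("HILLSBOROUGH COUNTY WATER", false, "hillsborough_water_resources", "high", "direct_hillsborough_utilities_party_match"),
   ("CITY OF TAMPA UTILITIES", false, "tampa_conduits", "high", "direct_city_tampa_utilities_party_match"),
   ("CITY OF TAMPA WATER", false, "tampa_conduits", "high", "direct_city_tampa_utilities_party_match"),
   ("CITY OF TAMPA WASTEWATER", false, "tampa_conduits", "high", "direct_city_tampa_utilities_party_match"),
   ("CITY OF TAMPA STORMWATER", false, "tampa_conduits", "high", "direct_city_tampa_utilities_party_match"),
   ("HILLSBOROUGH COUNTY", true, "hillsborough_water_resources", "medium", "hillsborough_county_plus_utility_terms"),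
   ("CITY OF TAMPA", true, "tampa_conduits", "medium", "city_tampa_plus_utility_terms")]

-- the loop body of Source B, as a helper closed over the substring test g and the hint flag U
-- B's fold step over token rules, abstracted over the substring test g and the hint flag U.
def pvStep (g : String → Bool) (U : Bool) (best : PySem.Dict String (String × String))
    (rule : String × Bool × String × String × String) : PySem.Dict String (String × String) :=
  let (token, needs_hint, provider, confidence, reason) := rule
  if (best.get? provider).isSome then best
  else if g token && (U || !needs_hint) then best.insert provider (confidence, reason)
  else best

def pvProviderOrder : List String := ["hillsborough_water_resources", "tampa_conduits"]

def classify_provider_hits_py_alt (haystack_upper : String) : List (String × String × String) :=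
  if haystack_upper = "" then []
  else
    let has_utility_hint := ["UTILITY", "UTILITIES", "WATER", "WASTEWATER", "SEWER", "STORMWATER",
      "LIEN"].any (fun t => PySem.Str.isIn t haystack_upper)
    let best : PySem.Dict String (String × String) :=
      pvRules.foldl
        (pvStep (fun t => PySem.Str.isIn t haystack_upper) has_utility_hint)
        PySem.Dict.empty
    pvProviderOrder.foldl
      (fun out p =>
        match best.get? p with
        | some (c, r) => out ++ [(p, c, r)]
        | none => out)
      []

-- ===== PRECONDITION & SPEC =====
def Spec_classify_provider_hits_py (haystack_upper : String) (out : List (String × String × String)) : Prop := out = classify_provider_hits_py_alt haystack_upper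
instance (haystack_upper : String) (out : List (String × String × String)) : Decidable (Spec_classify_provider_hits_py haystack_upper out) := by unfold Spec_classify_provider_hits_py; infer_instance

-- ===== CLAIM =====
def Claim_equal_classify_provider_hits_py : Prop := ∀ (haystack_upper : String), Dom_classify_provider_hits_py haystack_upper → Spec_classify_provider_hits_py haystack_upper (classify_provider_hits_py haystack_upper)

-- ===== LEMMAS AND PROOFS =====
-- the same step once the token has been replaced by its test's Bool value
def pvStepB (U : Bool) (best : PySem.Dict String (String × String))
    (rule : Bool × Bool × String × String × String) : PySem.Dict String (String × String) :=
  let (hit, needs_hint, provider, confidence, reason) := rule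
  if (best.get? provider).isSome then best
  else if hit && (U || !needs_hint) then best.insert provider (confidence, reason)
  else best

theorem pvFold_map (g : String → Bool) (U : Bool) :
    ∀ (rules : List (String × Bool × String × String × String))
      (best : PySem.Dict String (String × String)),
      rules.foldl (pvStep g U) best
        = (rules.map (fun r => (g r.1, r.2))).foldl (pvStepB U) best := by
  intro rules
  induction rules with
  | nil => intro best; rfl
  | cons r rs ih =>
    intro best
    rw [List.map_cons, List.foldl_cons, List.foldl_cons]
    have hstep : pvStep g U best r = pvStepB U best (g r.1, r.2) := by
      rcases r with ⟨t, nh, p, c, rr⟩; rfl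
    rw [hstep]
    exact ih _

-- Bool-abstracted mirror of A's non-empty branch.
def pvAexpr (b1 b2 b3 b4 c1 c2 c3 c4 U hc ct : Bool) : List (String × String × String) :=
  let hills_direct := b1 || (b2 || (b3 || (b4 || false)))
  let tampa_direct := c1 || (c2 || (c3 || (c4 || false)))
  let acc : List (String × String × String) := []
  let acc :=
    if hills_direct then
      acc ++ [("hillsborough_water_resources", "high", "direct_hillsborough_utilities_party_match")]
    else if hc && U then
      acc ++ [("hillsborough_water_resources", "medium", "hillsborough_county_plus_utility_terms")]
    else acc
  let acc :=
    if tampa_direct then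
      acc ++ [("tampa_conduits", "high", "direct_city_tampa_utilities_party_match")]
    else if ct && U then
      acc ++ [("tampa_conduits", "medium", "city_tampa_plus_utility_terms")]
    else acc
  acc

def pvBoolRules (b1 b2 b3 b4 c1 c2 c3 c4 hc ct : Bool) :
    List (Bool × Bool × String × String × String) :=
  [(b1, false, "hillsborough_water_resources", "high", "direct_hillsborough_utilities_party_match"),
   (b2, false, "hillsborough_water_resources", "high", "direct_hillsborough_utilities_party_match"),
   (b3, false, "hillsborough_water_resources", "high", "direct_hillsborough_utilities_party_match"),
   (b4, false, "hillsborough_water_resources", "high", "direct_hillsborough_utilities_party_match"),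
   (c1, false, "tampa_conduits", "high", "direct_city_tampa_utilities_party_match"),
   (c2, false, "tampa_conduits", "high", "direct_city_tampa_utilities_party_match"),
   (c3, false, "tampa_conduits", "high", "direct_city_tampa_utilities_party_match"),
   (c4, false, "tampa_conduits", "high", "direct_city_tampa_utilities_party_match"),
   (hc, true, "hillsborough_water_resources", "medium", "hillsborough_county_plus_utility_terms"),
   (ct, true, "tampa_conduits", "medium", "city_tampa_plus_utility_terms")]

-- Bool-abstracted mirror of B's non-empty branch.
def pvBexpr (b1 b2 b3 b4 c1 c2 c3 c4 U hc ct : Bool) : List (String × String × String) :=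
  let best := (pvBoolRules b1 b2 b3 b4 c1 c2 c3 c4 hc ct).foldl (pvStepB U) PySem.Dict.empty
  pvProviderOrder.foldl
    (fun out p =>
      match best.get? p with
      | some (c, r) => out ++ [(p, c, r)]
      | none => out)
    []

set_option maxHeartbeats 2000000 in
theorem pvExpr_eq : ∀ b1 b2 b3 b4 c1 c2 c3 c4 U hc ct : Bool,
    pvAexpr b1 b2 b3 b4 c1 c2 c3 c4 U hc ct = pvBexpr b1 b2 b3 b4 c1 c2 c3 c4 U hc ct := by
  decide

-- ===== VERDICT =====
set_option maxHeartbeats 1000000 in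
theorem classify_provider_hits_py_spec : Claim_equal_classify_provider_hits_py := by
  intro h _
  unfold Spec_classify_provider_hits_py
  by_cases he : h = ""
  · subst he; rfl
  · have ha : classify_provider_hits_py h =
        if h = "" then [] else
          pvAexpr (PySem.Str.isIn "HILLSBOROUGH COUNTY PUBLIC UTILITIES" h)
            (PySem.Str.isIn "HILLSBOROUGH COUNTY WATER RESOURCES" h)
            (PySem.Str.isIn "HILLSBOROUGH COUNTY UTILITIES" h)
            (PySem.Str.isIn "HILLSBOROUGH COUNTY WATER" h)
            (PySem.Str.isIn "CITY OF TAMPA UTILITIES" h)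
            (PySem.Str.isIn "CITY OF TAMPA WATER" h)
            (PySem.Str.isIn "CITY OF TAMPA WASTEWATER" h)
            (PySem.Str.isIn "CITY OF TAMPA STORMWATER" h)
            (["UTILITY", "UTILITIES", "WATER", "WASTEWATER", "SEWER", "STORMWATER",
              "LIEN"].any (fun t => PySem.Str.isIn t h))
            (PySem.Str.isIn "HILLSBOROUGH COUNTY" h)
            (PySem.Str.isIn "CITY OF TAMPA" h) := rfl
    have hb : classify_provider_hits_py_alt h =
        if h = "" then [] else
          List.foldl
            (fun out p =>
              match (List.foldl
                  (pvStep (fun t => PySem.Str.isIn t h)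
                    (["UTILITY", "UTILITIES", "WATER", "WASTEWATER", "SEWER", "STORMWATER",
                      "LIEN"].any (fun t => PySem.Str.isIn t h)))
                  PySem.Dict.empty pvRules).get? p with
              | some (c, r) => out ++ [(p, c, r)]
              | none => out)
            [] pvProviderOrder := rfl
    have hm : pvRules.map
        (fun r => ((fun t => PySem.Str.isIn t h) r.1, r.2)) =
        pvBoolRules (PySem.Str.isIn "HILLSBOROUGH COUNTY PUBLIC UTILITIES" h)
          (PySem.Str.isIn "HILLSBOROUGH COUNTY WATER RESOURCES" h)
          (PySem.Str.isIn "HILLSBOROUGH COUNTY UTILITIES" h)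
          (PySem.Str.isIn "HILLSBOROUGH COUNTY WATER" h)
          (PySem.Str.isIn "CITY OF TAMPA UTILITIES" h)
          (PySem.Str.isIn "CITY OF TAMPA WATER" h)
          (PySem.Str.isIn "CITY OF TAMPA WASTEWATER" h)
          (PySem.Str.isIn "CITY OF TAMPA STORMWATER" h)
          (PySem.Str.isIn "HILLSBOROUGH COUNTY" h)
          (PySem.Str.isIn "CITY OF TAMPA" h) := rfl
    rw [ha, hb, if_neg he, if_neg he, pvFold_map, hm]
    exact pvExpr_eq _ _ _ _ _ _ _ _ _ _ _
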